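-- pv_equiv track=rewrite | github.com/MarMiMu/pywordle-test | test.py | getEval
-- ===== SOURCE A (Python) =====
-- def getEval(result):
--     temp = 0
--     for i in result:
--         if i == "G":
--             temp += 2
--         if i == "Y":
--             temp += 1
--     return temp
-- ===== SOURCE B (Python) =====
-- def getEval(result):
--     xs = list(result)
--
--     def go(lo, hi):
--         if hi <= lo:
--             return 0
--         if hi - lo == 1:
--             x = xs[lo]
--             return 2 if x == "G" else (1 if x == "Y" else 0)
--         mid = (lo + hi) // 2
--         return go(lo, mid) + go(mid, hi)
--
--     return go(0, len(xs))
-- ===== Notes on version B (the rewrite author's own statement) =====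
-- stated objective: alternative
-- what changed: Replaces A's left-to-right accumulator loop with a divide-and-conquer recursion that scores each half of the index range independently and adds the halves (correct because the score is a sum over elements, hence associative under splitting).
import Mathlib
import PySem

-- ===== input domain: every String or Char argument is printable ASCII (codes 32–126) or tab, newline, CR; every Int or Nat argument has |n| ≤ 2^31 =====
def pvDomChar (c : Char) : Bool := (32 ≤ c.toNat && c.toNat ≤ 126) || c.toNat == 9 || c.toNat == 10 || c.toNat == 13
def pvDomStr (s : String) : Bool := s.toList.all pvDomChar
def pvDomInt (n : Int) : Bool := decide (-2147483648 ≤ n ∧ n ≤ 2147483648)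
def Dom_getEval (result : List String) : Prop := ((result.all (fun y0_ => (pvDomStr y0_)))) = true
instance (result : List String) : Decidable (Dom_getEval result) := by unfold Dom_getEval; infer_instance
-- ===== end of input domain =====

-- B replaces A's left-to-right accumulator loop with a divide-and-conquer recursion over index ranges (alternative structure; same cost).


-- ===== PORT A =====
def getEval (result : List String) : Int :=
  result.foldl (fun temp i =>
    let temp := if i == "G" then temp + 2 else temp
    if i == "Y" then temp + 1 else temp) 0

-- ===== PORT B =====
-- go(lo, hi) of Source B; xs[lo] is always in range when called (0 ≤ lo < hi ≤ len xs), so getD's default is never used.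
def getEvalGo (xs : List String) (lo hi : Nat) : Int :=
  if hi ≤ lo then 0
  else if hi - lo = 1 then
    let x := xs.getD lo ""
    if x == "G" then 2 else if x == "Y" then 1 else 0
  else
    let mid := (lo + hi) / 2
    getEvalGo xs lo mid + getEvalGo xs mid hi
termination_by hi - lo
decreasing_by all_goals omega

def getEval_alt (result : List String) : Int :=
  getEvalGo result 0 result.length

-- ===== PRECONDITION & SPEC =====
def Spec_getEval (result : List String) (out : Int) : Prop := out = getEval_alt result
instance (result : List String) (out : Int) : Decidable (Spec_getEval result out) := by unfold Spec_getEval; infer_instance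

-- ===== CLAIM (what is proved, stated in full; the proofs are below) =====
def Claim_equal_getEval : Prop := ∀ (result : List String), Dom_getEval result → Spec_getEval result (getEval result)

-- ===== LEMMAS AND PROOFS =====
def pvScore (l : List String) : Int := 2 * (l.count "G" : Int) + (l.count "Y" : Int)

theorem pvScore_append (a b : List String) : pvScore (a ++ b) = pvScore a + pvScore b := by
  simp [pvScore, List.count_append]; ring

theorem getEval_foldl (result : List String) (a : Int) :
    result.foldl (fun temp i =>
      let temp := if i == "G" then temp + 2 else temp
      if i == "Y" then temp + 1 else temp) a
    = a + pvScore result := by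
  induction result generalizing a with
  | nil => simp [pvScore]
  | cons x xs ih =>
    simp only [List.foldl_cons, ih, pvScore, List.count_cons]
    by_cases hG : x = "G" <;> by_cases hY : x = "Y" <;>
      simp [hG, hY, beq_iff_eq] <;> ring

theorem pvScore_single (xs : List String) (lo hi : Nat) (hlo : lo < xs.length) (h1 : hi - lo = 1) :
    pvScore ((xs.drop lo).take (hi - lo))
    = (if xs[lo] == "G" then 2 else if xs[lo] == "Y" then (1 : Int) else 0) := by
  rw [List.drop_eq_getElem_cons hlo, h1, List.take_succ_cons, List.take_zero]
  by_cases hG : xs[lo] = "G" <;> by_cases hY : xs[lo] = "Y" <;>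
    simp [hG, hY, pvScore, beq_iff_eq]

theorem getEvalGo_eq (xs : List String) (lo hi : Nat) (hhi : hi ≤ xs.length) :
    getEvalGo xs lo hi = pvScore ((xs.drop lo).take (hi - lo)) := by
  induction lo, hi using getEvalGo.induct xs with
  | case1 lo hi h =>
    rw [getEvalGo]
    simp [h, Nat.sub_eq_zero_of_le h, pvScore]
  | case2 lo hi h h1 x hG =>
    have hlo : lo < xs.length := by omega
    have hx : xs.getD lo "" = xs[lo] := by simp [List.getD, hlo]
    rw [getEvalGo, pvScore_single xs lo hi hlo h1]
    simp only [if_neg h, if_pos h1, hx]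
  | case3 lo hi h h1 x hG hY =>
    have hlo : lo < xs.length := by omega
    have hx : xs.getD lo "" = xs[lo] := by simp [List.getD, hlo]
    rw [getEvalGo, pvScore_single xs lo hi hlo h1]
    simp only [if_neg h, if_pos h1, hx]
  | case4 lo hi h h1 x hG hY =>
    have hlo : lo < xs.length := by omega
    have hx : xs.getD lo "" = xs[lo] := by simp [List.getD, hlo]
    rw [getEvalGo, pvScore_single xs lo hi hlo h1]
    simp only [if_neg h, if_pos h1, hx]
  | case5 lo hi h h1 mid ih1 ih2 =>
    rw [getEvalGo]
    simp only [if_neg h, if_neg h1]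
    rw [ih1 (by omega), ih2 hhi]
    have hsplit : (xs.drop lo).take (hi - lo)
        = (xs.drop lo).take ((lo + hi) / 2 - lo) ++ (xs.drop ((lo + hi) / 2)).take (hi - (lo + hi) / 2) := by
      have hd : xs.drop ((lo + hi) / 2) = (xs.drop lo).drop ((lo + hi) / 2 - lo) := by
        rw [List.drop_drop]; congr 1; omega
      rw [hd, ← List.take_add]
      congr 1; omega
    rw [hsplit, pvScore_append]

-- ===== VERDICT (by name: the statement is the Claim_ definition above) =====
theorem getEval_spec : Claim_equal_getEval := by
  intro result _
  unfold Spec_getEval getEval getEval_alt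
  rw [getEval_foldl, getEvalGo_eq result 0 result.length le_rfl]
  simp
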